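-- pv_equiv track=rewrite | github.com/vinhdangquoc729/CVRPPD_framework | vrp/solvers/ga_pd_hct.py | _balanced_split
-- ===== SOURCE A (Python) =====
-- from typing import List, Dict, Tuple, Optional
--
-- def _balanced_split(items: List[int], k: int) -> List[List[int]]:
--     """Chia items thành k phần (xấp xỉ cân bằng)."""
--     k = max(1, k)
--     n = len(items)
--     if k >= n:
--         return [[x] for x in items] + [[] for _ in range(k - n)]
--     # round-robin để đều
--     parts = [[] for _ in range(k)]
--     for i, x in enumerate(items):
--         parts[i % k].append(x)
--     return parts
-- ===== SOURCE B (Python) =====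
-- from typing import List
--
-- def _balanced_split(items: List[int], k: int) -> List[List[int]]:
--     """Chia items thành k phần (xấp xỉ cân bằng)."""
--     k = max(1, k)
--     return [items[j::k] for j in range(k)]
-- ===== Notes on version B (the rewrite author's own statement) =====
-- stated objective: simpler
-- what changed: The single-pass modulo scatter loop (append items[i] to parts[i % k]) and the separate k >= n branch are both replaced by building each bucket j directly as the strided slice items[j::k]; no bucket state and no special case remain.
import Mathlib
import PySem

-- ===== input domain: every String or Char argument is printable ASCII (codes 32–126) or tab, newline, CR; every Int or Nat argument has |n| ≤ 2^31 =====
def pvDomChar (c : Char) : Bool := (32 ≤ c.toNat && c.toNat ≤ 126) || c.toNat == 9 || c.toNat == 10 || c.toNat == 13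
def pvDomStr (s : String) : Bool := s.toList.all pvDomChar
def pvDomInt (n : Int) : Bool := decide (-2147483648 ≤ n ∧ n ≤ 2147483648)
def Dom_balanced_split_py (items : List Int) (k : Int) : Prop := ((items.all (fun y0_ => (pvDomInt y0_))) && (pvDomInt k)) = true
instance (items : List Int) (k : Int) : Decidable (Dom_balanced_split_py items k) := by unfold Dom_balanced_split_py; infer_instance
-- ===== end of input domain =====

-- B replaces A's round-robin scatter loop (and its separate k>=n branch) by k strided slices items[j::k]; objective: simpler/idiomatic, same cost.


-- ===== PORT A =====
def balanced_split_py (items : List Int) (k : Int) : List (List Int) :=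
  let k' := max 1 k
  let n : Int := items.length
  if k' ≥ n then
    items.map (fun x => [x]) ++ List.replicate (k' - n).toNat []
  else
    let parts := List.replicate k'.toNat ([] : List Int)
    (PySem.List.enumerate items 0).foldl
      (fun parts ix =>
        let idx := (PySem.Int.mod ix.1 k').toNat
        parts.set idx (parts.getD idx [] ++ [ix.2])) parts

-- ===== PORT B =====
def balanced_split_py_alt (items : List Int) (k : Int) : List (List Int) :=
  let k' := max 1 k
  (PySem.List.pyRange 0 k' 1).map (fun j => (PySem.List.slice? items (some j) none k').getD [])

-- ===== PRECONDITION & SPEC =====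
def Spec_balanced_split_py (items : List Int) (k : Int) (out : List (List Int)) : Prop := out = balanced_split_py_alt items k
instance (items : List Int) (k : Int) (out : List (List Int)) : Decidable (Spec_balanced_split_py items k out) := by unfold Spec_balanced_split_py; infer_instance

-- ===== CLAIM (what is proved, stated in full; the proofs are below) =====
def Claim_equal_balanced_split_py : Prop := ∀ (items : List Int) (k : Int), Dom_balanced_split_py items k → Spec_balanced_split_py items k (balanced_split_py items k)

-- ===== LEMMAS AND PROOFS =====

-- every K-th element of a list (the common normal form of both ports' buckets)
def everyKth (K : Nat) : List Int → List Int
  | [] => []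
  | x :: xs => x :: everyKth K (xs.drop (K - 1))
termination_by l => l.length
decreasing_by simp [List.length_drop]

theorem filterMap_range_of_none {α : Type} (f : Nat → Option α) {m n : Nat} (h : m ≤ n)
    (h2 : ∀ t, m ≤ t → f t = none) :
    (List.range n).filterMap f = (List.range m).filterMap f := by
  have hn : n = m + (n - m) := by omega
  rw [hn, List.range_add, List.filterMap_append]
  have he : (List.filterMap f (List.map (m + ·) (List.range (n - m)))) = [] := by
    rw [List.filterMap_map]
    apply List.filterMap_eq_nil_iff.mpr
    intro t _
    exact h2 (m + t) (Nat.le_add_right m t)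
  simp [he]

theorem everyKth_eq_filterMap (K : Nat) (hK : 0 < K) (ys : List Int) :
    (List.range ys.length).filterMap (fun t => ys[K * t]?) = everyKth K ys := by
  induction hl : ys.length using Nat.strong_induction_on generalizing ys with
  | _ n ih =>
    subst hl
    match ys with
    | [] => simp [everyKth]
    | x :: t =>
      rw [everyKth]
      rw [show (x :: t).length = t.length + 1 from rfl, List.range_succ_eq_map, List.filterMap_cons]
      simp only [Nat.mul_zero, List.getElem?_cons_zero]
      rw [List.filterMap_map]
      have hstep : ∀ u : Nat, ((fun v => (x :: t)[K * v]?) ∘ Nat.succ) u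
          = (fun v => (t.drop (K - 1))[K * v]?) u := by
        intro u
        simp only [Function.comp_apply]
        have h1 : K * (u + 1) = ((K - 1) + (K * u)) + 1 := by
          cases K with | zero => omega | succ k => ring_nf; omega
        rw [show Nat.succ u = u + 1 from rfl, h1, List.getElem?_cons_succ, List.getElem?_drop]
      rw [funext hstep]
      have hle : (t.drop (K - 1)).length ≤ t.length := by simp
      have hnone : ∀ u, (t.drop (K - 1)).length ≤ u → (t.drop (K - 1))[K * u]? = none := by
        intro u hu
        apply List.getElem?_eq_none
        calc (t.drop (K - 1)).length ≤ u := hu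
          _ ≤ K * u := Nat.le_mul_of_pos_left u hK
      rw [filterMap_range_of_none _ hle hnone]
      rw [ih (t.drop (K - 1)).length (by rw [List.length_drop, List.length_cons]; omega) _ rfl]

-- B's slice items[j::K] for j ≥ 0, K ≥ 1 is everyKth of the dropped list
theorem slice?_pos (xs : List Int) (j K : Int) (hj : 0 ≤ j) (hK : 0 < K) :
    PySem.List.slice? xs (some j) none K = some (everyKth K.toNat (xs.drop j.toNat)) := by
  simp only [PySem.List.slice?, PySem.List.sliceIndices]
  rw [if_neg (by omega)]
  simp only [if_neg (by omega : ¬ K < 0), if_neg (by omega : ¬ j < 0), if_pos hK]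
  by_cases hge : (xs.length : Int) ≤ j
  · rw [min_eq_right hge, if_neg (by omega)]
    rw [List.drop_eq_nil_of_le (by omega : xs.length ≤ j.toNat)]
    simp [everyKth]
  · push_neg at hge
    rw [min_eq_left (by omega), if_pos hge]
    set a : Int := (xs.length : Int) - j with ha
    have ha1 : 1 ≤ a := by omega
    set c : Int := (a + K - 1) / K with hc
    have hc0 : 0 ≤ c := Int.ediv_nonneg (by omega) (by omega)
    have hcle : c ≤ a := by
      have := Int.ediv_le_ediv hK (show a + K - 1 ≤ a * K from by nlinarith)
      rwa [Int.mul_ediv_cancel _ (by omega)] at this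
    have hKc : a ≤ K * c := by
      have h1 := Int.mul_ediv_add_emod (a + K - 1) K
      have h2 := Int.emod_lt_of_pos (a + K - 1) hK
      linarith
    set ys : List Int := xs.drop j.toNat with hys
    have hm : ys.length = a.toNat := by rw [hys, List.length_drop]; omega
    have hcongr : ∀ t ∈ List.range c.toNat, xs[(j + K * (t : Int)).toNat]? = ys[K.toNat * t]? := by
      intro t _
      have hidx : (j + K * (t : Int)).toNat = j.toNat + K.toNat * t := by
        have : j + K * (t : Int) = ((j.toNat + K.toNat * t : Nat) : Int) := by
          push_cast [Int.toNat_of_nonneg hj, Int.toNat_of_nonneg hK.le]; ring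
        rw [this, Int.toNat_natCast]
      rw [hidx, hys, List.getElem?_drop]
    rw [List.filterMap_congr hcongr]
    have hclem : c.toNat ≤ ys.length := by omega
    have hnone : ∀ t, c.toNat ≤ t → ys[K.toNat * t]? = none := by
      intro t ht
      apply List.getElem?_eq_none
      have h2 : K.toNat * c.toNat ≤ K.toNat * t := Nat.mul_le_mul_left _ ht
      have h3 : a.toNat ≤ K.toNat * c.toNat := by
        have : (K * c).toNat = K.toNat * c.toNat := by
          rw [Int.toNat_mul (by omega) (by omega)]
        omega
      omega
    congr 1
    rw [← filterMap_range_of_none _ hclem hnone]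
    exact everyKth_eq_filterMap K.toNat (by omega) ys

theorem sub_one_emod (a K : Int) (hK : 0 < K) :
    (a - 1) % K = if a % K = 0 then K - 1 else a % K - 1 := by
  have h1 : a - 1 = (a % K - 1) + K * (a / K) := by
    have := Int.mul_ediv_add_emod a K
    linarith
  have h2 : (a - 1) % K = (a % K - 1) % K := by
    rw [h1, Int.add_mul_emod_self_left]
  have hb := Int.emod_nonneg a (by omega : K ≠ 0)
  have hlt := Int.emod_lt_of_pos a hK
  rw [h2]
  by_cases h0 : a % K = 0
  · rw [if_pos h0, h0]
    rw [show (0 - 1 : Int) = (K - 1) + K * (-1) from by ring, Int.add_mul_emod_self_left]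
    exact Int.emod_eq_of_lt (by omega) (by omega)
  · rw [if_neg h0]
    exact Int.emod_eq_of_lt (by omega) (by omega)

-- A's round-robin loop: bucket j collects every K-th element starting at offset (j - i) mod K
theorem foldA (K : Int) (hK : 0 < K) (xs : List Int) :
    ∀ (i : Int), 0 ≤ i → ∀ (parts : List (List Int)), parts.length = K.toNat →
      (((PySem.List.enumerate xs i).foldl
          (fun parts ix =>
            parts.set (PySem.Int.mod ix.1 K).toNat
              (parts.getD (PySem.Int.mod ix.1 K).toNat [] ++ [ix.2])) parts).length = K.toNat ∧
       ∀ j : Nat, j < K.toNat →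
        ((PySem.List.enumerate xs i).foldl
          (fun parts ix =>
            parts.set (PySem.Int.mod ix.1 K).toNat
              (parts.getD (PySem.Int.mod ix.1 K).toNat [] ++ [ix.2])) parts).getD j []
          = parts.getD j [] ++ everyKth K.toNat (xs.drop (((j : Int) - i) % K).toNat)) := by
  induction xs with
  | nil =>
    intro i hi parts hlen
    simp [PySem.List.enumerate, everyKth, hlen]
  | cons x t ih =>
    intro i hi parts hlen
    rw [PySem.List.enumerate_cons, List.foldl_cons]
    set idx : Nat := (PySem.Int.mod i K).toNat with hidx
    set parts' : List (List Int) := parts.set idx (parts.getD idx [] ++ [x]) with hp'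
    have hlen' : parts'.length = K.toNat := by rw [hp', List.length_set, hlen]
    obtain ⟨ihlen, ihbuck⟩ := ih (i + 1) (by omega) parts' hlen'
    refine ⟨ihlen, ?_⟩
    intro j hj
    rw [ihbuck j hj]
    have hmod : PySem.Int.mod i K = i % K := PySem.Int.mod_eq_emod_of_pos hK
    have hmb0 : 0 ≤ i % K := Int.emod_nonneg i (by omega)
    have hmb1 : i % K < K := Int.emod_lt_of_pos i hK
    have hd0 : 0 ≤ ((j : Int) - i) % K := Int.emod_nonneg _ (by omega)
    have hd1 : ((j : Int) - i) % K < K := Int.emod_lt_of_pos _ hK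
    have hsub : ((j : Int) - (i + 1)) % K
        = if ((j : Int) - i) % K = 0 then K - 1 else ((j : Int) - i) % K - 1 := by
      rw [show (j : Int) - (i + 1) = ((j : Int) - i) - 1 from by ring]
      exact sub_one_emod _ K hK
    by_cases hcase : j = idx
    · -- the element x lands in bucket j
      have hjint : (j : Int) = i % K := by rw [hcase, hidx, hmod]; omega
      have hz : ((j : Int) - i) % K = 0 := by
        rw [Int.sub_emod, hjint, Int.emod_emod_of_dvd i (dvd_refl K)]
        simp
      rw [hz] at hsub ⊢
      rw [if_pos rfl] at hsub
      have hp'j : parts'.getD j [] = parts.getD j [] ++ [x] := by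
        rw [hp', hcase]
        have : idx < parts.length := by rw [hlen]; omega
        simp [List.getD, this]
      rw [hp'j, hsub]
      have hdrop0 : (x :: t).drop ((0 : Int)).toNat = x :: t := by simp
      rw [hdrop0, everyKth]
      rw [show (K - 1).toNat = K.toNat - 1 from by omega]
      simp [List.append_assoc]
    · -- bucket j untouched by this step
      have hp'j : parts'.getD j [] = parts.getD j [] := by
        rw [hp']
        simp [List.getD, List.getElem?_set_ne (by omega : idx ≠ j)]
      have hnz : ((j : Int) - i) % K ≠ 0 := by
        intro h0
        apply hcase
        obtain ⟨m, hm⟩ := Int.dvd_of_emod_eq_zero h0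
        have hji : (j : Int) = i + K * m := by linarith
        have hejm : (j : Int) % K = i % K := by rw [hji, Int.add_mul_emod_self_left]
        have h2 : (j : Int) % K = (j : Int) := Int.emod_eq_of_lt (by omega) (by omega)
        rw [hidx, hmod]
        omega
      rw [hsub, if_neg hnz, hp'j]
      have hdrop : (x :: t).drop (((j : Int) - i) % K).toNat
          = t.drop ((((j : Int) - i) % K - 1).toNat) := by
        rw [show (((j : Int) - i) % K).toNat = ((((j : Int) - i) % K - 1).toNat) + 1 from by omega]
        rfl
      rw [hdrop]

theorem everyKth_small (K : Nat) (xs : List Int) (h : xs.length ≤ K) (j : Nat) :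
    everyKth K (xs.drop j) = if hj : j < xs.length then [xs[j]] else [] := by
  by_cases hj : j < xs.length
  · rw [dif_pos hj, List.drop_eq_getElem_cons hj, everyKth]
    rw [List.drop_drop]
    rw [List.drop_eq_nil_of_le (by omega : xs.length ≤ j + 1 + (K - 1))]
    rw [everyKth]
  · rw [dif_neg hj, List.drop_eq_nil_of_le (by omega), everyKth]

theorem balanced_split_eq (items : List Int) (k : Int) :
    balanced_split_py items k = balanced_split_py_alt items k := by
  simp only [balanced_split_py, balanced_split_py_alt]
  set k' : Int := max 1 k with hk'
  have hK : 0 < k' := by omega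
  have hBlen : ((PySem.List.pyRange 0 k' 1).map
      (fun j => (PySem.List.slice? items (some j) none k').getD [])).length = k'.toNat := by
    rw [List.length_map, PySem.List.length_pyRange_one]; omega
  have hBelem : ∀ (t : Nat) (ht : t < ((PySem.List.pyRange 0 k' 1).map
        (fun j => (PySem.List.slice? items (some j) none k').getD [])).length),
      ((PySem.List.pyRange 0 k' 1).map
        (fun j => (PySem.List.slice? items (some j) none k').getD []))[t] =
      everyKth k'.toNat (items.drop t) := by
    intro t ht
    have ht2 : t < k'.toNat := by rw [hBlen] at ht; exact ht
    rw [List.getElem_map]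
    rw [PySem.List.getElem_pyRange_one]
    rw [show (0 : Int) + (t : Int) = (t : Int) from by ring]
    rw [slice?_pos items t k' (by omega) hK]
    rw [Option.getD_some, Int.toNat_natCast]
  by_cases hbr : k' ≥ (items.length : Int)
  · rw [if_pos hbr]
    apply List.ext_getElem
    · rw [hBlen, List.length_append, List.length_map, List.length_replicate]; omega
    · intro t h1 h2
      rw [hBelem t h2]
      rw [everyKth_small k'.toNat items (by omega) t]
      by_cases ht : t < items.length
      · rw [dif_pos ht, List.getElem_append_left (by rw [List.length_map]; omega)]
        simp
      · rw [dif_neg ht, List.getElem_append_right (by rw [List.length_map]; omega)]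
        rw [List.getElem_replicate]
  · rw [if_neg hbr]
    obtain ⟨hAlen, hAbuck⟩ := foldA k' hK items 0 (le_refl 0)
      (List.replicate k'.toNat []) (by rw [List.length_replicate])
    apply List.ext_getElem
    · rw [hAlen, hBlen]
    · intro t h1 h2
      rw [hBelem t h2]
      have ht2 : t < k'.toNat := by rw [hBlen] at h2; exact h2
      have hA := hAbuck t ht2
      rw [List.getD_eq_getElem _ _ h1] at hA
      rw [hA]
      rw [List.getD_eq_getElem _ _ (by rw [List.length_replicate]; omega :
        t < (List.replicate k'.toNat ([] : List Int)).length)]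
      rw [List.getElem_replicate, List.nil_append]
      rw [show ((t : Int) - 0) % k' = (t : Int) from by
        rw [Int.sub_zero]; exact Int.emod_eq_of_lt (by omega) (by omega)]
      rw [Int.toNat_natCast]

-- ===== VERDICT (by name: the statement is the Claim_ definition above) =====
theorem balanced_split_py_spec : Claim_equal_balanced_split_py := by
  intro items k _
  unfold Spec_balanced_split_py
  exact balanced_split_eq items k
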